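-- pv_equiv track=rewrite | github.com/lavkushry/ELKChatbot | prompt_builder.py | _get_field_examples
-- ===== SOURCE A (Python) =====
-- from typing import Dict, Any, List
--
-- def _get_field_examples(fields: List[str]) -> str:
--     """Generate examples of how to use common fields"""
--     examples = []
--
--     # Common patterns
--     text_fields = [f for f in fields if not f.endswith('.keyword') and 'name' in f.lower()]
--     if text_fields:
--         examples.append(f"Text search: {{\"match\": {{\"{text_fields[0]}\": \"search term\"}}}}")
--
--     keyword_fields = [f for f in fields if f.endswith('.keyword')]
--     if keyword_fields:
--         examples.append(f"Exact match: {{\"term\": {{\"{keyword_fields[0]}\": \"exact value\"}}}}")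
--
--     numeric_fields = [f for f in fields if any(x in f.lower() for x in ['price', 'amount', 'quantity', 'total'])]
--     if numeric_fields:
--         examples.append(f"Numeric range: {{\"range\": {{\"{numeric_fields[0]}\": {{\"gte\": 100}}}}}}")
--
--     date_fields = [f for f in fields if any(x in f.lower() for x in ['date', 'time', 'created'])]
--     if date_fields:
--         examples.append(f"Date range: {{\"range\": {{\"{date_fields[0]}\": {{\"gte\": \"now-30d\"}}}}}}")
--
--     return '\n'.join(examples) if examples else "No specific examples available"
-- ===== SOURCE B (Python) =====
-- def _get_field_examples(fields):
--     """Single pass: fill one slot per category with the first matching field."""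
--     text = keyword = numeric = date = None
--     for f in fields:
--         fl = f.lower()
--         if text is None and not f.endswith('.keyword') and 'name' in fl:
--             text = f
--         if keyword is None and f.endswith('.keyword'):
--             keyword = f
--         if numeric is None and any(x in fl for x in ('price', 'amount', 'quantity', 'total')):
--             numeric = f
--         if date is None and any(x in fl for x in ('date', 'time', 'created')):
--             date = f
--     parts = []
--     if text is not None:
--         parts.append(f"Text search: {{\"match\": {{\"{text}\": \"search term\"}}}}")
--     if keyword is not None:
--         parts.append(f"Exact match: {{\"term\": {{\"{keyword}\": \"exact value\"}}}}")
--     if numeric is not None: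
--         parts.append(f"Numeric range: {{\"range\": {{\"{numeric}\": {{\"gte\": 100}}}}}}")
--     if date is not None:
--         parts.append(f"Date range: {{\"range\": {{\"{date}\": {{\"gte\": \"now-30d\"}}}}}}")
--     return '\n'.join(parts) if parts else "No specific examples available"
-- ===== Notes on version B (the rewrite author's own statement) =====
-- stated objective: alternative
-- what changed: Replaced A's four independent list-comprehension passes (each materializing a whole filtered list only to use its first element) by a single fold over fields that fills one first-match slot per category, then emits the example lines from the slots in the same fixed order.
import Mathlib
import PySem

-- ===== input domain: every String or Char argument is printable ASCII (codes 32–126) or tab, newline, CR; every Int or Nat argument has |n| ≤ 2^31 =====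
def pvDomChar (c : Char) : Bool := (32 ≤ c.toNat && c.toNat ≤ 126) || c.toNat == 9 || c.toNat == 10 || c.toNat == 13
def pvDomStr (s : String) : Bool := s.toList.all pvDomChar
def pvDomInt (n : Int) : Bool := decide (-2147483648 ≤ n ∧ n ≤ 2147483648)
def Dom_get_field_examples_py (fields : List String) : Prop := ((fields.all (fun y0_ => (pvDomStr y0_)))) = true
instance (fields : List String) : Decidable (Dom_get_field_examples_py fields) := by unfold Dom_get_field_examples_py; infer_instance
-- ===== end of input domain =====

-- B replaces A's four separate filter passes over `fields` by a single fold that fills one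
-- first-match slot per category (alternative decomposition; same asymptotic cost).


-- ===== PORT A =====
-- shared category predicates and example formatters (the same string literals in both Pythons)
def pvTextPred (f : String) : Bool :=
  !PySem.Str.endswith f ".keyword" && PySem.Str.isIn "name" (PySem.Str.lower f)
def pvKwPred (f : String) : Bool := PySem.Str.endswith f ".keyword"
def pvNumPred (f : String) : Bool :=
  (["price", "amount", "quantity", "total"] : List String).any
    (fun x => PySem.Str.isIn x (PySem.Str.lower f))
def pvDatePred (f : String) : Bool :=
  (["date", "time", "created"] : List String).any
    (fun x => PySem.Str.isIn x (PySem.Str.lower f))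
def pvTextEx (f : String) : String := "Text search: {\"match\": {\"" ++ f ++ "\": \"search term\"}}"
def pvKwEx (f : String) : String := "Exact match: {\"term\": {\"" ++ f ++ "\": \"exact value\"}}"
def pvNumEx (f : String) : String := "Numeric range: {\"range\": {\"" ++ f ++ "\": {\"gte\": 100}}}"
def pvDateEx (f : String) : String := "Date range: {\"range\": {\"" ++ f ++ "\": {\"gte\": \"now-30d\"}}}"

def get_field_examples_py (fields : List String) : String :=
  let examples : List String := []
  let text_fields := fields.filter pvTextPred
  let examples := match text_fields with
    | [] => examples
    | f :: _ => examples ++ [pvTextEx f]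
  let keyword_fields := fields.filter pvKwPred
  let examples := match keyword_fields with
    | [] => examples
    | f :: _ => examples ++ [pvKwEx f]
  let numeric_fields := fields.filter pvNumPred
  let examples := match numeric_fields with
    | [] => examples
    | f :: _ => examples ++ [pvNumEx f]
  let date_fields := fields.filter pvDatePred
  let examples := match date_fields with
    | [] => examples
    | f :: _ => examples ++ [pvDateEx f]
  if examples.isEmpty then "No specific examples available"
  else PySem.Str.join "\n" examples

-- ===== PORT B =====
-- one pass: four first-match slots, filled while the slot is still empty
def pvStep (s : Option String × Option String × Option String × Option String) (f : String) :
    Option String × Option String × Option String × Option String :=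
  ((if s.1.isNone && pvTextPred f then some f else s.1),
   (if s.2.1.isNone && pvKwPred f then some f else s.2.1),
   (if s.2.2.1.isNone && pvNumPred f then some f else s.2.2.1),
   (if s.2.2.2.isNone && pvDatePred f then some f else s.2.2.2))

def get_field_examples_py_alt (fields : List String) : String :=
  let slots := fields.foldl pvStep (none, none, none, none)
  let parts : List String :=
    (match slots.1 with | some f => [pvTextEx f] | none => []) ++
    (match slots.2.1 with | some f => [pvKwEx f] | none => []) ++
    (match slots.2.2.1 with | some f => [pvNumEx f] | none => []) ++
    (match slots.2.2.2 with | some f => [pvDateEx f] | none => [])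
  if parts.isEmpty then "No specific examples available"
  else PySem.Str.join "\n" parts

-- ===== PRECONDITION & SPEC =====
def Spec_get_field_examples_py (fields : List String) (out : String) : Prop := out = get_field_examples_py_alt fields
instance (fields : List String) (out : String) : Decidable (Spec_get_field_examples_py fields out) := by unfold Spec_get_field_examples_py; infer_instance

-- ===== CLAIM (what is proved, stated in full; the proofs are below) =====
def Claim_equal_get_field_examples_py : Prop := ∀ (fields : List String), Dom_get_field_examples_py fields → Spec_get_field_examples_py fields (get_field_examples_py fields)

-- ===== LEMMAS AND PROOFS =====

-- a one-slot first-match fold, to decompose pvStep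
def pvOne (p : String → Bool) (o : Option String) (l : List String) : Option String :=
  l.foldl (fun o f => if o.isNone && p f then some f else o) o

theorem pvOne_some (p : String → Bool) (x : String) (l : List String) :
    pvOne p (some x) l = some x := by
  induction l with
  | nil => rfl
  | cons f t ih => simpa [pvOne] using ih

theorem pvOne_none_eq_find? (p : String → Bool) (l : List String) :
    pvOne p none l = l.find? p := by
  induction l with
  | nil => rfl
  | cons f t ih =>
    by_cases h : p f
    · rw [show pvOne p none (f :: t) = pvOne p (some f) t by simp [pvOne, h],
        pvOne_some, List.find?_cons_of_pos h]
    · rw [show pvOne p none (f :: t) = pvOne p none t by simp [pvOne, h], ih,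
        List.find?_cons_of_neg h]

theorem pvFold_eq (l : List String)
    (s : Option String × Option String × Option String × Option String) :
    l.foldl pvStep s = (pvOne pvTextPred s.1 l, pvOne pvKwPred s.2.1 l,
      pvOne pvNumPred s.2.2.1 l, pvOne pvDatePred s.2.2.2 l) := by
  induction l generalizing s with
  | nil => rfl
  | cons f t ih => simp [pvStep, pvOne, ih]

theorem pvHead_filter_eq_find? (p : String → Bool) (l : List String) :
    (l.filter p).head? = l.find? p := by
  induction l with
  | nil => rfl
  | cons f t ih =>
    by_cases h : p f
    · simp [h, List.find?_cons_of_pos h]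
    · simp [h, List.find?_cons_of_neg h, ih]

-- ===== VERDICT (by name: the statement is the Claim_ definition above) =====
theorem get_field_examples_py_spec : Claim_equal_get_field_examples_py := by
  intro fields _
  unfold Spec_get_field_examples_py get_field_examples_py get_field_examples_py_alt
  rw [pvFold_eq]
  simp only [pvOne_none_eq_find?, ← pvHead_filter_eq_find?]
  cases fields.filter pvTextPred <;> cases fields.filter pvKwPred <;>
    cases fields.filter pvNumPred <;> cases fields.filter pvDatePred <;> simp
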